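-- pv_equiv track=rewrite | github.com/Jeffery2004/Mini_project | demo.py | fix_style_issues
-- ===== SOURCE A (Python) =====
-- def fix_style_issues(code: str) -> str:
--     """Trim long lines and simplify style errors."""
--     lines = code.split('\n')
--     corrected_lines = []
--     for line in lines:
--         if len(line) > 100:
--             corrected_lines.append(line[:100] + '  # truncated')
--         else:
--             corrected_lines.append(line)
--     return '\n'.join(corrected_lines)
-- ===== SOURCE B (Python) =====
-- def fix_style_issues(code: str) -> str:
--     # Single left-to-right scan with a column counter; never builds a list of lines.
--     out = []
--     col = 0
--     i = 0
--     n = len(code)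
--     while i < n:
--         c = code[i]
--         if c == '\n':
--             out.append(c)
--             col = 0
--             i += 1
--         elif col < 100:
--             out.append(c)
--             col += 1
--             i += 1
--         else:
--             out.append('  # truncated')
--             i += 1
--             while i < n and code[i] != '\n':
--                 i += 1
--     return ''.join(out)
-- ===== Notes on version B (the rewrite author's own statement) =====
-- stated objective: alternative
-- what changed: B replaces A's split-on-newline / per-line loop / join pipeline by a single left-to-right character scan with a column counter that emits the truncation sentinel at column 100 and skips to the next newline, never building a list of lines.
import Mathlib
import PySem

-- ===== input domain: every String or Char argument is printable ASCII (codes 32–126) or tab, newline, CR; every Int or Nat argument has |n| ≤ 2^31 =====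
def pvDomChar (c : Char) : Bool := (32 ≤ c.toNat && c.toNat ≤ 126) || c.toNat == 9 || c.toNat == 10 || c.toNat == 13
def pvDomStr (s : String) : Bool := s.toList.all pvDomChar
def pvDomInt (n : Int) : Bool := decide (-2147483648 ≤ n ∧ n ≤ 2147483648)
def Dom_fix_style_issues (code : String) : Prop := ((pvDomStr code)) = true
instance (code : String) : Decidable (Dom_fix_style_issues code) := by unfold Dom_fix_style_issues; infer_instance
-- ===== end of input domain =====

-- B replaces A's split/loop/join over a list of lines by a single character scan with a
-- column counter (objective: alternative; same O(n) cost, no list of lines is built).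

-- ===== PORT A =====
-- lines = code.split('\n'); for line in lines: append truncated-or-not; '\n'.join(...)
def fix_style_issues (code : String) : String :=
  let lines := PySem.Chars.splitOn code.toList ['\n']
  let corrected := lines.foldl (fun acc line =>
    if 100 < PySem.Chars.len line then
      acc ++ [PySem.Chars.slice line none (some 100) ++ ("  # truncated".toList)]
    else
      acc ++ [line]) []
  String.ofList (PySem.Chars.join ['\n'] corrected)

-- ===== PORT B =====
-- the scanning loop of Source B: copy chars, reset the column at '\n', at column 100 emit the
-- sentinel and skip to the next newline
def pvScan : List Char → Nat → List Char
  | [], _ => []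
  | c :: rest, col =>
    if c = '\n' then '\n' :: pvScan rest 0
    else if col < 100 then c :: pvScan rest (col + 1)
    else ("  # truncated".toList) ++ pvScan (rest.dropWhile (fun x => x ≠ '\n')) col
termination_by cs _ => cs.length
decreasing_by
  · simp
  · simp
  · exact Nat.lt_succ_of_le (List.length_dropWhile_le _ _)

def fix_style_issues_alt (code : String) : String :=
  String.ofList (pvScan code.toList 0)

-- ===== PRECONDITION & SPEC =====
def Spec_fix_style_issues (code : String) (out : String) : Prop := out = fix_style_issues_alt code
instance (code : String) (out : String) : Decidable (Spec_fix_style_issues code out) := by unfold Spec_fix_style_issues; infer_instance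

-- ===== CLAIM (what is proved, stated in full; the proofs are below) =====
def Claim_equal_fix_style_issues : Prop := ∀ (code : String), Dom_fix_style_issues code → Spec_fix_style_issues code (fix_style_issues code)

-- ===== LEMMAS AND PROOFS =====

-- per-line correction, as A applies it after the split
def pvF (line : List Char) : List Char :=
  if 100 < line.length then line.take 100 ++ ("  # truncated".toList) else line

-- reference splitter: split on '\n', structural recursion
def pvSplit : List Char → List (List Char)
  | [] => [[]]
  | c :: r => if c = '\n' then [] :: pvSplit r else (pvSplit r).modifyHead (c :: ·)

-- truncation of a line of which `col` characters are already emitted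
def pvTrunc (col : Nat) (line : List Char) : List Char :=
  if 100 < col + line.length then line.take (100 - col) ++ ("  # truncated".toList) else line

lemma pvSplit_ne_nil (cs : List Char) : pvSplit cs ≠ [] := by
  induction cs with
  | nil => simp [pvSplit]
  | cons c r ih =>
    simp only [pvSplit]
    split
    · simp
    · intro h
      have := congrArg List.length h
      rw [List.length_modifyHead] at this
      exact ih (List.length_eq_zero_iff.mp (by simpa using this))

lemma go_eq (fuel : Nat) : ∀ (l cur : List Char) (acc : List (List Char)), l.length ≤ fuel →
    PySem.Chars.splitOn.go ['\n'] fuel l cur acc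
      = acc.reverse ++ (pvSplit l).modifyHead (cur.reverse ++ ·) := by
  induction fuel with
  | zero =>
    intro l cur acc h
    have : l = [] := by cases l <;> simp_all
    subst this
    rw [PySem.Chars.splitOn.go]
    simp [pvSplit]
  | succ f ih =>
    intro l cur acc h
    cases l with
    | nil =>
      rw [PySem.Chars.splitOn.go]
      · simp [pvSplit]
      · omega
    | cons c rest =>
      rw [PySem.Chars.splitOn.go]
      by_cases hc : c = '\n'
      · subst hc
        have hpre : ['\n'].isPrefixOf ('\n' :: rest) = true := by simp [List.isPrefixOf]
        rw [if_pos hpre]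
        simp only [List.length_cons] at h
        rw [ih _ _ _ (by simpa using Nat.le_of_succ_le_succ h)]
        simp only [pvSplit, List.modifyHead, List.reverse_cons,
          List.append_assoc, List.singleton_append]
        cases h : pvSplit rest
        · exact absurd h (pvSplit_ne_nil rest)
        · simp [h]
      · have hpre : ['\n'].isPrefixOf (c :: rest) = false := by
          simp [List.isPrefixOf]; exact fun h' => absurd h'.symm hc
        rw [if_neg (by simp [hpre])]
        simp only [List.length_cons] at h
        rw [ih _ _ _ (by omega)]
        simp only [pvSplit, if_neg hc, List.modifyHead_modifyHead]
        congr 2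
        funext x
        simp

lemma splitOn_eq (cs : List Char) : PySem.Chars.splitOn cs ['\n'] = pvSplit cs := by
  unfold PySem.Chars.splitOn
  rw [go_eq (cs.length + 1) cs [] [] (by omega)]
  cases h : pvSplit cs with
  | nil => exact absurd h (pvSplit_ne_nil cs)
  | cons a t => simp [List.modifyHead]

lemma foldl_eq_map (lines acc : List (List Char)) :
    lines.foldl (fun acc line =>
      if 100 < PySem.Chars.len line then
        acc ++ [PySem.Chars.slice line none (some 100) ++ ("  # truncated".toList)]
      else acc ++ [line]) acc = acc ++ lines.map pvF := by
  induction lines generalizing acc with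
  | nil => simp
  | cons l t ih =>
    simp only [List.foldl_cons, List.map_cons, ih]
    have hs : PySem.Chars.slice l none (some 100) = l.take 100 := by
      rw [PySem.Chars.slice_eq_listSlice, PySem.List.slice_to _ (by norm_num)]
      have : (100 : Int).toNat = 100 := by decide
      rw [this]
    simp only [PySem.Chars.len_eq, pvF, hs]
    by_cases h : 100 < l.length
    · rw [if_pos (by exact_mod_cast h), if_pos h]
      simp
    · rw [if_neg (by exact_mod_cast h), if_neg h]
      simp

lemma pvScan_reset (rest : List Char) (col : Nat)
    (hr : rest = [] ∨ ∃ r, rest = '\n' :: r) :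
    pvScan rest col = pvScan rest 0 := by
  rcases hr with h | ⟨r, h⟩ <;> subst h <;> simp [pvScan]

lemma scan_line (line : List Char) : ∀ (rest : List Char) (col : Nat), col ≤ 100 →
    '\n' ∉ line → (rest = [] ∨ ∃ r, rest = '\n' :: r) →
    pvScan (line ++ rest) col = pvTrunc col line ++ pvScan rest 0 := by
  induction line with
  | nil =>
    intro rest col hcol _ hr
    have : ¬ (100 < col + ([] : List Char).length) := by simp; omega
    simp only [List.nil_append, pvTrunc, if_neg this]
    simpa using pvScan_reset rest col hr
  | cons c line ih =>
    intro rest col hcol hmem hr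
    have hc : c ≠ '\n' := fun h => hmem (h ▸ List.mem_cons_self ..)
    have hmem' : '\n' ∉ line := fun h => hmem (List.mem_cons_of_mem _ h)
    by_cases hlt : col < 100
    · rw [List.cons_append, pvScan, if_neg hc, if_pos hlt,
        ih rest (col + 1) (by omega) hmem' hr]
      simp only [pvTrunc, List.length_cons]
      by_cases hb : 100 < (col + 1) + line.length
      · rw [if_pos hb, if_pos (by omega)]
        have h100 : 100 - col = (100 - (col + 1)) + 1 := by omega
        simp [h100, List.take_succ_cons]
      · rw [if_neg hb, if_neg (by omega)]
        simp
    · have hcol100 : col = 100 := by omega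
      subst hcol100
      rw [List.cons_append, pvScan, if_neg hc, if_neg hlt]
      have hdw : (line ++ rest).dropWhile (fun x => x ≠ '\n') = rest := by
        rw [List.dropWhile_append]
        have h1 : line.dropWhile (fun x => x ≠ '\n') = [] :=
          List.dropWhile_eq_nil_iff.mpr (fun x hx => by
            simp; exact fun h => absurd (h ▸ hx) hmem')
        rw [h1]
        rcases hr with h | ⟨r, h⟩ <;> subst h <;> simp
      rw [hdw, pvScan_reset rest 100 hr]
      simp [pvTrunc]

def pvRestSplit : List Char → List (List Char)
  | [] => []
  | _ :: r => pvSplit r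

lemma pvSplit_decomp (cs : List Char) :
    pvSplit cs = cs.takeWhile (fun x => x ≠ '\n') :: pvRestSplit (cs.dropWhile (fun x => x ≠ '\n')) := by
  induction cs with
  | nil => simp [pvSplit, pvRestSplit]
  | cons c r ih =>
    by_cases hc : c = '\n'
    · subst hc; simp [pvSplit, pvRestSplit]
    · simp only [pvSplit, if_neg hc, ih, List.modifyHead,
        List.takeWhile_cons, List.dropWhile_cons]
      simp [hc]

lemma scan_eq_join (cs : List Char) :
    pvScan cs 0 = PySem.Chars.join ['\n'] ((pvSplit cs).map pvF) := by
  have hsplit := List.takeWhile_append_dropWhile (p := fun x => x ≠ '\n') (l := cs)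
  have hmem : '\n' ∉ cs.takeWhile (fun x => x ≠ '\n') := by
    intro h
    have := List.mem_takeWhile_imp h
    simp at this
  have hr : cs.dropWhile (fun x => x ≠ '\n') = [] ∨
      ∃ r, cs.dropWhile (fun x => x ≠ '\n') = '\n' :: r := by
    cases hd : cs.dropWhile (fun x => x ≠ '\n') with
    | nil => exact Or.inl rfl
    | cons a r =>
      right
      refine ⟨r, ?_⟩
      have := List.head?_dropWhile_not (p := fun x => x ≠ '\n') (l := cs)
      rw [hd] at this
      simp at this
      rw [this]
    
  have hline := scan_line (cs.takeWhile (fun x => x ≠ '\n'))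
    (cs.dropWhile (fun x => x ≠ '\n')) 0 (by omega) hmem hr
  rw [hsplit] at hline
  have htrunc : pvTrunc 0 (cs.takeWhile (fun x => x ≠ '\n'))
      = pvF (cs.takeWhile (fun x => x ≠ '\n')) := by
    simp [pvTrunc, pvF]
  rw [hline, htrunc, pvSplit_decomp cs]
  rcases hr with hd | ⟨r, hd⟩
  · rw [hd]
    simp [pvScan, pvRestSplit, PySem.Chars.join_singleton]
  · rw [hd]
    simp only [pvRestSplit, List.map_cons]
    rw [pvScan, if_pos rfl]
    have hlen : r.length < cs.length := by
      have := congrArg List.length hsplit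
      rw [hd] at this
      simp at this
      omega
    rw [scan_eq_join r]
    cases hm : (pvSplit r).map pvF with
    | nil =>
      exact absurd (List.map_eq_nil_iff.mp hm) (pvSplit_ne_nil r)
    | cons b t =>
      rw [PySem.Chars.join_cons_cons]
      simp
termination_by cs.length
decreasing_by exact hlen

-- ===== VERDICT (by name: the statement is the Claim_ definition above) =====
theorem fix_style_issues_spec : Claim_equal_fix_style_issues := by
  intro code _
  unfold Spec_fix_style_issues fix_style_issues fix_style_issues_alt
  simp only [splitOn_eq, foldl_eq_map, List.nil_append, scan_eq_join]
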